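-- pv_equiv track=rewrite | github.com/cla05211/Preguntados-pygame | Pygame/funciones.py | dividir_string_en_dos_lineas
-- ===== SOURCE A (Python) =====
-- def dividir_string_en_dos_lineas (lista_strings:list,posicion_lista:int,linea_buscada:str)->str:
--     pregunta = lista_strings[posicion_lista]
--     largo_pregunta = len(pregunta)
--     pregunta_largo_par = convertir_pregunta_impar_a_par(largo_pregunta)
--     lista_palabras_pregunta = (pregunta.split(" "))
--     linea_uno = ""
--     linea_dos = ""
--     i = 0
--     for palabra in lista_palabras_pregunta:
--         if i < (len(lista_palabras_pregunta)/2):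
--             linea_uno += palabra
--             linea_uno += " "
--             i += 1
--         else:
--             linea_dos += palabra
--             linea_dos += " "
--     if linea_buscada == "primera":
--         return linea_uno
--     else:
--         return linea_dos
--
-- def determinar_si_numero_es_par(numero:int):
--     es_par = False
--     resto = numero % 2
--     if resto == 0:
--         es_par = True
--     return es_par
--
-- def convertir_pregunta_impar_a_par(largo_pregunta:int) -> int:
--     pregunta_es_par = determinar_si_numero_es_par(largo_pregunta)
--     if not pregunta_es_par:
--                 largo_pregunta += 1
--     return(largo_pregunta)
-- ===== SOURCE B (Python) =====
-- def dividir_string_en_dos_lineas(lista_strings: list, posicion_lista: int, linea_buscada: str) -> str: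
--     palabras = lista_strings[posicion_lista].split(" ")
--     corte = (len(palabras) + 1) // 2
--     mitad = palabras[:corte] if linea_buscada == "primera" else palabras[corte:]
--     return " ".join(mitad) + " " if mitad else ""
-- ===== Notes on version B (the rewrite author's own statement) =====
-- stated objective: simpler
-- what changed: Replaces the stateful per-word loop (index counter, threshold test on each word, string += accumulation) by computing the ceiling split index once, slicing the word list into two halves and building the requested line with a single ' '.join; the unused convertir_pregunta_impar_a_par computation is dropped.
import Mathlib
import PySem

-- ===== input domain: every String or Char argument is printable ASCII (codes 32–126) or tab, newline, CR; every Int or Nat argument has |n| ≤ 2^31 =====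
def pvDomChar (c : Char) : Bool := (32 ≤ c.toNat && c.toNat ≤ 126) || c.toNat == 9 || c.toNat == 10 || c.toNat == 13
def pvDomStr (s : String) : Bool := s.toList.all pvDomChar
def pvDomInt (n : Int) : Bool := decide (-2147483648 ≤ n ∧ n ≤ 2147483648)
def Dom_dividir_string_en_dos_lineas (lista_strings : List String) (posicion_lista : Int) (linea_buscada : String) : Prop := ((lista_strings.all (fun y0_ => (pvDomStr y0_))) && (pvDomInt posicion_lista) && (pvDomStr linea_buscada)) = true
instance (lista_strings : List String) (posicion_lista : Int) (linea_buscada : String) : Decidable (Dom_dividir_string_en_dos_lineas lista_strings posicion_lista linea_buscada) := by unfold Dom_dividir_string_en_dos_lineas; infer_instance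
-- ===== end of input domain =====

-- B replaces A's counter-and-threshold word loop by a precomputed ceiling split index,
-- two list slices and a single join (objective: simpler); return values are identical on Pre_.

-- ===== PORT A =====
def determinar_si_numero_es_par (numero : Int) : Bool :=
  let es_par := false
  let resto := PySem.Int.mod numero 2
  if resto == 0 then true else es_par

def convertir_pregunta_impar_a_par (largo_pregunta : Int) : Int :=
  let pregunta_es_par := determinar_si_numero_es_par largo_pregunta
  if !pregunta_es_par then largo_pregunta + 1 else largo_pregunta

-- Python's 'i < len(...)/2' compares ints via exact float division; for |i|,|n| ≤ 2^31
-- this is exactly '2*i < n', which is how the branch condition is ported.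
def dividir_string_en_dos_lineas (lista_strings : List String) (posicion_lista : Int) (linea_buscada : String) : String :=
  match PySem.List.pyGet? lista_strings posicion_lista with
  | none => ""   -- IndexError in Python; excluded by Pre_
  | some pregunta =>
    let largo_pregunta := PySem.Str.len pregunta
    let _pregunta_largo_par := convertir_pregunta_impar_a_par largo_pregunta  -- computed, never used (as in A)
    match PySem.Str.split? pregunta " " with
    | none => ""  -- unreachable: separator " " is non-empty
    | some lista_palabras_pregunta =>
      let n : Int := lista_palabras_pregunta.length
      let st := lista_palabras_pregunta.foldl
        (fun (s : List Char × List Char × Int) palabra =>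
          if 2 * s.2.2 < n then (s.1 ++ palabra.toList ++ [' '], s.2.1, s.2.2 + 1)
          else (s.1, s.2.1 ++ palabra.toList ++ [' '], s.2.2))
        ([], [], 0)
      if linea_buscada == "primera" then String.ofList st.1 else String.ofList st.2.1

-- ===== PORT B =====
def dividir_string_en_dos_lineas_alt (lista_strings : List String) (posicion_lista : Int) (linea_buscada : String) : String :=
  match PySem.List.pyGet? lista_strings posicion_lista with
  | none => ""   -- IndexError in Python; excluded by Pre_
  | some pregunta =>
    match PySem.Str.split? pregunta " " with
    | none => ""  -- unreachable: separator " " is non-empty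
    | some palabras =>
      let corte := PySem.Int.floordiv ((palabras.length : Int) + 1) 2
      let mitad := if linea_buscada == "primera"
                   then PySem.List.slice palabras none (some corte)
                   else PySem.List.slice palabras (some corte) none
      if mitad.isEmpty then ""
      else String.ofList (PySem.Chars.join [' '] (mitad.map String.toList) ++ [' '])

-- ===== PRECONDITION & SPEC =====
-- Pre_ excludes exactly the inputs where Python A raises IndexError on lista_strings[posicion_lista].
def Pre_dividir_string_en_dos_lineas (lista_strings : List String) (posicion_lista : Int) (linea_buscada : String) : Prop :=
  PySem.Raise.InRange lista_strings.length posicion_lista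
instance (lista_strings : List String) (posicion_lista : Int) (linea_buscada : String) : Decidable (Pre_dividir_string_en_dos_lineas lista_strings posicion_lista linea_buscada) := by unfold Pre_dividir_string_en_dos_lineas; infer_instance

def pvWitness_dividir_string_en_dos_lineas : List String × Int × String := (["hola que tal amigos"], 0, "primera")

def Spec_dividir_string_en_dos_lineas (lista_strings : List String) (posicion_lista : Int) (linea_buscada : String) (out : String) : Prop := out = dividir_string_en_dos_lineas_alt lista_strings posicion_lista linea_buscada
instance (lista_strings : List String) (posicion_lista : Int) (linea_buscada : String) (out : String) : Decidable (Spec_dividir_string_en_dos_lineas lista_strings posicion_lista linea_buscada out) := by unfold Spec_dividir_string_en_dos_lineas; infer_instance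

-- ===== CLAIM (what is proved, stated in full; the proofs are below) =====
def Claim_equal_dividir_string_en_dos_lineas : Prop := ∀ (lista_strings : List String) (posicion_lista : Int) (linea_buscada : String), Dom_dividir_string_en_dos_lineas lista_strings posicion_lista linea_buscada → Pre_dividir_string_en_dos_lineas lista_strings posicion_lista linea_buscada → Spec_dividir_string_en_dos_lineas lista_strings posicion_lista linea_buscada (dividir_string_en_dos_lineas lista_strings posicion_lista linea_buscada)

-- ===== LEMMAS AND PROOFS =====

/-- Each word followed by a space, concatenated: what A's loop appends to a line. -/
def pvGlue (ws : List String) : List Char := ws.flatMap (fun w => w.toList ++ [' '])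

theorem pvGlue_nil : pvGlue [] = [] := rfl
theorem pvGlue_cons (w : String) (ws : List String) :
    pvGlue (w :: ws) = w.toList ++ [' '] ++ pvGlue ws := by
  simp [pvGlue]

/-- B's 'join + trailing space unless empty' builds exactly pvGlue. -/
theorem pvJoin_eq_glue (hs : List String) :
    (if hs.isEmpty then ([] : List Char)
     else PySem.Chars.join [' '] (hs.map String.toList) ++ [' ']) = pvGlue hs := by
  induction hs with
  | nil => rfl
  | cons w rest ih =>
    cases rest with
    | nil => simp [PySem.Chars.join_singleton, pvGlue]
    | cons w2 rest2 =>
      rw [pvGlue_cons, ← ih]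
      simp [PySem.Chars.join_cons_cons]

/-- Characterisation of A's fold: with total word count N and counter starting at i,
    the first ⌈N/2⌉ - i words go to line one, the rest to line two. -/
theorem pvFoldA_char (N : Nat) (ws : List String) (l1 l2 : List Char) (i : Nat) :
    ws.foldl
      (fun (s : List Char × List Char × Int) palabra =>
        if 2 * s.2.2 < (N : Int) then (s.1 ++ palabra.toList ++ [' '], s.2.1, s.2.2 + 1)
        else (s.1, s.2.1 ++ palabra.toList ++ [' '], s.2.2))
      (l1, l2, (i : Int)) =
    (l1 ++ pvGlue (ws.take ((N + 1) / 2 - i)),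
     l2 ++ pvGlue (ws.drop ((N + 1) / 2 - i)),
     ((max i (min ((N + 1) / 2) (i + ws.length)) : Nat) : Int)) := by
  induction ws generalizing l1 l2 i with
  | nil =>
    simp [pvGlue_nil]
  | cons w rest ih =>
    simp only [List.foldl_cons]
    by_cases h : 2 * i < N
    · have hcond : 2 * ((i : Int)) < (N : Int) := by exact_mod_cast (by omega : (2 * i : Int) < N)
      have hcast : ((i : Int)) + 1 = ((i + 1 : Nat) : Int) := by push_cast; ring
      rw [if_pos hcond, hcast, ih]
      have htake : (w :: rest).take ((N + 1) / 2 - i) = w :: rest.take ((N + 1) / 2 - (i + 1)) := by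
        have hs : (N + 1) / 2 - i = ((N + 1) / 2 - (i + 1)) + 1 := by omega
        rw [hs, List.take_succ_cons]
      have hdrop : (w :: rest).drop ((N + 1) / 2 - i) = rest.drop ((N + 1) / 2 - (i + 1)) := by
        have hs : (N + 1) / 2 - i = ((N + 1) / 2 - (i + 1)) + 1 := by omega
        rw [hs, List.drop_succ_cons]
      have h3 : max (i + 1) (min ((N + 1) / 2) (i + 1 + rest.length))
          = max i (min ((N + 1) / 2) (i + (w :: rest).length)) := by
        simp only [List.length_cons]; omega
      rw [htake, hdrop, pvGlue_cons, h3]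
      simp
    · have hcond : ¬ (2 * ((i : Int)) < (N : Int)) := by
        intro hc
        exact h (by exact_mod_cast (by omega : (2 * (i : Int)) < (N : Int) → (2 * i : Int) < N) hc)
      have hz : (N + 1) / 2 - i = 0 := by omega
      rw [if_neg hcond, ih, hz]
      have h3 : max i (min ((N + 1) / 2) (i + rest.length))
          = max i (min ((N + 1) / 2) (i + (w :: rest).length)) := by
        simp only [List.length_cons]; omega
      rw [h3]
      simp [pvGlue_cons, pvGlue_nil]

theorem pvOfList_nil : String.ofList ([] : List Char) = "" := rfl

-- ===== VERDICT (by name: the statement is the Claim_ definition above) =====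
theorem dividir_string_en_dos_lineas_spec : Claim_equal_dividir_string_en_dos_lineas := by
  intro lista_strings posicion_lista linea_buscada _hdom _hpre
  unfold Spec_dividir_string_en_dos_lineas
  rcases hget : PySem.List.pyGet? lista_strings posicion_lista with _ | pregunta
  · simp only [dividir_string_en_dos_lineas, dividir_string_en_dos_lineas_alt, hget]
  · rcases hsplit : PySem.Str.split? pregunta " " with _ | palabras
    · simp only [dividir_string_en_dos_lineas, dividir_string_en_dos_lineas_alt, hget, hsplit]
    · simp only [dividir_string_en_dos_lineas, dividir_string_en_dos_lineas_alt, hget, hsplit]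
      have hfold := pvFoldA_char palabras.length palabras [] [] 0
      simp only [Nat.cast_zero, Nat.sub_zero, List.nil_append] at hfold
      have hcorte : PySem.Int.floordiv ((palabras.length : Int) + 1) 2
          = (((palabras.length + 1) / 2 : Nat) : Int) := by
        exact_mod_cast PySem.Int.floordiv_natCast (palabras.length + 1) 2
      rw [hfold, hcorte, PySem.List.slice_to_natCast, PySem.List.slice_from_natCast]
      by_cases hlb : (linea_buscada == "primera") = true
      · rw [if_pos hlb, if_pos hlb]
        have hjoin := pvJoin_eq_glue (palabras.take ((palabras.length + 1) / 2))
        by_cases he : (palabras.take ((palabras.length + 1) / 2)).isEmpty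
        · rw [if_pos he]
          rw [if_pos he] at hjoin
          rw [← hjoin, pvOfList_nil]
        · rw [if_neg he]
          rw [if_neg he] at hjoin
          rw [hjoin]
      · rw [if_neg hlb, if_neg hlb]
        have hjoin := pvJoin_eq_glue (palabras.drop ((palabras.length + 1) / 2))
        by_cases he : (palabras.drop ((palabras.length + 1) / 2)).isEmpty
        · rw [if_pos he]
          rw [if_pos he] at hjoin
          rw [← hjoin, pvOfList_nil]
        · rw [if_neg he]
          rw [if_neg he] at hjoin
          rw [hjoin]
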